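-- pv_equiv track=rewrite | github.com/fullscreen-triangle/poincare | docs/mass-computing/src/ternary_core.py | cell_to_tryte
-- ===== SOURCE A (Python) =====
-- from typing import Tuple, List, Optional, Dict, Any
--
-- def cell_to_tryte(cell: int) -> Tuple[int, ...]:
--     """Convert cell index (0-728) to 6-trit tryte."""
--     if cell < 0 or cell >= 729:
--         raise ValueError("Cell index must be 0-728")
--
--     trits = []
--     for _ in range(6):
--         trits.append(cell % 3)
--         cell //= 3
--     return tuple(reversed(trits))
-- ===== SOURCE B (Python) =====
-- def cell_to_tryte(cell: int):
--     """Convert cell index (0-728) to 6-trit tryte, most-significant first."""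
--     if cell < 0 or cell >= 729:
--         raise ValueError("Cell index must be 0-728")
--     return tuple((cell // p) % 3 for p in (243, 81, 27, 9, 3, 1))
-- ===== Notes on version B (the rewrite author's own statement) =====
-- stated objective: simpler
-- what changed: Replaces the mutate-quotient loop that appends least-significant digits and then reverses with a direct per-position extraction (cell // 3**(5-i)) % 3 over the fixed powers, most-significant first; no accumulator mutation, no reversal.
import Mathlib
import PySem

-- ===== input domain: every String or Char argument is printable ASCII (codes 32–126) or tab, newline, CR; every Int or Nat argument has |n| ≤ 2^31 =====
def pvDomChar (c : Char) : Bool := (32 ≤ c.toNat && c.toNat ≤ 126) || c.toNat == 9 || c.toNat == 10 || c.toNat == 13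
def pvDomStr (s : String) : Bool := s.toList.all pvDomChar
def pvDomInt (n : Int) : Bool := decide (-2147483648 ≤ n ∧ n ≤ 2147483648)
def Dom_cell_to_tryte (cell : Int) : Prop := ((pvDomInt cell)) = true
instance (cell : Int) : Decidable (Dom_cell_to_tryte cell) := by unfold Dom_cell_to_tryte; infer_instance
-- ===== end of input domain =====

set_option maxRecDepth 10000

-- B replaces A's append-then-reverse quotient loop with direct per-position digit extraction (simpler decomposition).

-- ===== PORT A =====
-- loop: for _ in range(6): trits.append(cell % 3); cell //= 3 — then reversed
def cell_to_tryte (cell : Int) : List Int :=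
  let st := (List.range 6).foldl
    (fun (st : Int × List Int) _ =>
      (PySem.Int.floordiv st.1 3, st.2 ++ [PySem.Int.mod st.1 3]))
    (cell, [])
  st.2.reverse

-- ===== PORT B =====
-- digit at position i is (cell // 3**(5-i)) % 3, over the fixed powers 243,81,27,9,3,1
def cell_to_tryte_alt (cell : Int) : List Int :=
  [(243 : Int), 81, 27, 9, 3, 1].map
    (fun p => PySem.Int.mod (PySem.Int.floordiv cell p) 3)

-- ===== PRECONDITION & SPEC =====
-- A raises ValueError outside 0 ≤ cell < 729; exactly those inputs are excluded.
def Pre_cell_to_tryte (cell : Int) : Prop := 0 ≤ cell ∧ cell < 729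
instance (cell : Int) : Decidable (Pre_cell_to_tryte cell) := by unfold Pre_cell_to_tryte; infer_instance
def pvWitness_cell_to_tryte : Int := (500)

def Spec_cell_to_tryte (cell : Int) (out : List Int) : Prop := out = cell_to_tryte_alt cell
instance (cell : Int) (out : List Int) : Decidable (Spec_cell_to_tryte cell out) := by unfold Spec_cell_to_tryte; infer_instance

-- ===== CLAIM (what is proved, stated in full; the proofs are below) =====
def Claim_equal_cell_to_tryte : Prop := ∀ (cell : Int), Dom_cell_to_tryte cell → Pre_cell_to_tryte cell → Spec_cell_to_tryte cell (cell_to_tryte cell)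

-- ===== LEMMAS AND PROOFS =====
theorem cell_to_tryte_fin : ∀ n : Fin 729, cell_to_tryte (n : Int) = cell_to_tryte_alt (n : Int) := by decide

-- ===== VERDICT (by name: the statement is the Claim_ definition above) =====
theorem cell_to_tryte_spec : Claim_equal_cell_to_tryte := by
  intro cell _ hpre
  have h0 : 0 ≤ cell := hpre.1
  have h1 : cell < 729 := hpre.2
  have hn : cell.toNat < 729 := by omega
  have hc : ((⟨cell.toNat, hn⟩ : Fin 729) : Int) = cell := by simp; omega
  have := cell_to_tryte_fin ⟨cell.toNat, hn⟩
  unfold Spec_cell_to_tryte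
  rw [hc] at this
  exact this
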